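-- pv_equiv track=rewrite | github.com/muneebaifrah/Unstop-100-Days-Coding-Sprint | Day-49/2.Server_System_Vulnerabilities.py | min_total_vulnerability
-- ===== SOURCE A (Python) =====
-- def min_total_vulnerability(N, K, arr):
--     # dp[i] represents the minimum sum of vulnerabilities for subarray arr[0...i-1]
--     dp = [float('inf')] * (N + 1)
--     dp[0] = 0  # base case: no subarray, no vulnerability
--
--     # Process each position in the array
--     for i in range(1, N + 1):
--         # We consider subarrays of length at most K
--         max_vul = 0
--         # Try different subarray lengths ending at index i
--         for j in range(1, min(K, i) + 1):
--             # Update the maximum vulnerability in the subarray arr[i-j...i-1]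
--             max_vul = max(max_vul, arr[i - j])
--             dp[i] = min(dp[i], dp[i - j] + max_vul)
--
--     # The minimum total sum of vulnerabilities is stored in dp[N]
--     return dp[N]
-- ===== SOURCE B (Python) =====
-- def min_total_vulnerability(N, K, arr):
--     # Monotonic-stack DP.  The segment weight is max(0, max of the segment)
--     # (A's running max starts at 0), so dp is nondecreasing and inside a block
--     # of starts sharing the same window maximum the best start is the leftmost
--     # valid one.  The stack keeps blocks (l, m): every start j in the block has
--     # max(0, max(arr[j:i])) == m, with m strictly decreasing bottom to top.
--     dp = [0] + [float('inf')] * N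
--     stack = []
--     for i in range(1, N + 1):
--         x = arr[i - 1]
--         if x < 0:
--             x = 0
--         l = i - 1
--         while stack and stack[-1][1] <= x:
--             l = stack.pop()[0]
--         stack.append((l, x))
--         lo = i - K
--         if lo < 0:
--             lo = 0
--         while len(stack) > 1 and stack[1][0] <= lo:
--             del stack[0]
--         dp[i] = min(dp[lt if lt > lo else lo] + mt for (lt, mt) in stack)
--     return dp[N]
-- ===== Notes on version B (the rewrite author's own statement) =====
-- stated objective: faster
-- what changed: A recomputes, for every position i, a running maximum over up to K earlier starts (pull DP, O(K) per position); B maintains a monotonic stack of blocks of segment starts sharing the same window maximum (exploiting that the 0-clamped weights make dp nondecreasing, so a block's best start is its leftmost valid one), so each position scans only the distinct-maximum blocks inside the window instead of all K starts.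
-- outside the precondition, e.g. on min_total_vulnerability(2, 0, [1, 2]): A returns inf, B returns inf; on min_total_vulnerability(9, -1, [0, -1, 8786, 0, -12, 2]): A returns inf, B raises IndexError
import Mathlib
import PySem

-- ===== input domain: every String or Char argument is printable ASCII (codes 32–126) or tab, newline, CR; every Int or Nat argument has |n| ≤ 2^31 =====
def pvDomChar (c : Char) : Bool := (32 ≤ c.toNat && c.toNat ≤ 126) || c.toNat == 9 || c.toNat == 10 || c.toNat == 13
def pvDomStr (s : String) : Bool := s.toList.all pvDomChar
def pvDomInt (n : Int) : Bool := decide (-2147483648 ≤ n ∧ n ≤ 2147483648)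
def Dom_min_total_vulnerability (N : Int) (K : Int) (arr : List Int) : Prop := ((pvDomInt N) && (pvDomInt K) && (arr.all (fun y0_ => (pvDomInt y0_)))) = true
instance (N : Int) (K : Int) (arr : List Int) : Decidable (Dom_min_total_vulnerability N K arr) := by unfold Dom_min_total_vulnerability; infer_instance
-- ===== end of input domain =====

-- B replaces A's O(N*K) pull DP (a fresh running-max scan over up to K starts for
-- every position) by a monotonic stack of blocks of starts sharing the same window
-- maximum, scanning only the distinct-maximum blocks per position.

-- ===== PORT A =====
-- Python's float('inf') is modelled as `none`; pyMinO/addO mirror Python's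
-- min/+ on (int or inf) exactly as A uses them.
def pyMinO : Option Int → Option Int → Option Int
  | none, b => b
  | some a, none => some a
  | some a, some b => some (min a b)

def addO : Option Int → Int → Option Int
  | none, _ => none
  | some a, x => some (a + x)

-- inner loop of A: j runs over `rem` values starting at `j`; state (max_vul, dp[i])
def aInner (arr : List Int) (dp : List (Option Int)) (i : Nat) :
    Nat → Nat → Int → Option Int → Option Int
  | 0, _, _, acc => acc
  | rem+1, j, mv, acc =>
      let mv' := max mv (arr.getD (i - j) 0)
      aInner arr dp i rem (j+1) mv' (pyMinO acc (addO (dp.getD (i - j) none) mv'))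

-- outer loop of A: i = 1 .. N
def aOuter (arr : List Int) (K : Int) : Nat → Nat → List (Option Int) → List (Option Int)
  | 0, _, dp => dp
  | rem+1, i, dp =>
      let v := aInner arr dp i (min K (i : Int)).toNat 1 0 (dp.getD i none)
      aOuter arr K rem (i+1) (dp.set i v)

def min_total_vulnerability (N : Int) (K : Int) (arr : List Int) : Int :=
  let n := N.toNat
  let dp0 := (List.replicate (n+1) (none : Option Int)).set 0 (some 0)
  let dpF := aOuter arr K n 1 dp0
  (dpF.getD n none).getD 0   -- under Pre_ the cell is finite; the getD 0 is unreachable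

-- ===== PORT B =====
-- The stack of blocks (l, m) is stored top→bottom (Lean head = Python stack[-1]);
-- trimming from the bottom (Python `del stack[0]`) therefore works on the reversed
-- list, and the min-scan folds the same candidates (min is commutative).

-- Python: while stack and stack[-1][1] <= x: l = stack.pop()[0]
def popMerge (x : Int) : List (Nat × Int) → Nat → (List (Nat × Int) × Nat)
  | [], l => ([], l)
  | (l', m') :: rest, l => if m' ≤ x then popMerge x rest l' else ((l', m') :: rest, l)

-- Python: while len(stack) > 1 and stack[1][0] <= lo: del stack[0]   (on the bottom→top view)
def trimRec (lo : Nat) : List (Nat × Int) → List (Nat × Int)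
  | e1 :: e2 :: rest => if e2.1 ≤ lo then trimRec lo (e2 :: rest) else e1 :: e2 :: rest
  | s => s

-- Python: min(dp[max(lt, lo)] + mt for (lt, mt) in stack)
def scanMin (dp : List Int) (lo : Nat) : List (Nat × Int) → Int → Int
  | [], acc => acc
  | (l, m) :: rest, acc => scanMin dp lo rest (min acc (dp.getD (max l lo) 0 + m))

def bLoop (arr : List Int) (K : Int) (n : Nat) : Nat → Nat → List Int → List (Nat × Int) → List Int
  | 0, _, dp, _ => dp
  | rem+1, i, dp, stack =>
      let x0 := arr.getD (i-1) 0
      let x := if x0 < 0 then 0 else x0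
      let pm := popMerge x stack (i-1)
      let stack1 := (pm.2, x) :: pm.1
      let lo := ((i : Int) - K).toNat
      let stack2 := (trimRec lo stack1.reverse).reverse
      let v := match stack2 with
        | [] => 0   -- unreachable: the stack always contains the entry just pushed
        | (l0, m0) :: rest => scanMin dp lo rest (dp.getD (max l0 lo) 0 + m0)
      bLoop arr K n rem (i+1) (dp.set i v) stack2

def min_total_vulnerability_alt (N : Int) (K : Int) (arr : List Int) : Int :=
  let n := N.toNat
  (bLoop arr K n n 1 (List.replicate (n+1) (0 : Int)) []).getD n 0

-- ===== PRECONDITION & SPEC =====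
-- Pre_ excludes exactly the inputs on which Python A does not return an int:
-- N < 0 or N > len(arr) raise IndexError, and K ≤ 0 with N ≥ 1 returns float('inf').
def Pre_min_total_vulnerability (N : Int) (K : Int) (arr : List Int) : Prop :=
  0 ≤ N ∧ N ≤ (arr.length : Int) ∧ (1 ≤ K ∨ N = 0)
instance (N : Int) (K : Int) (arr : List Int) : Decidable (Pre_min_total_vulnerability N K arr) := by
  unfold Pre_min_total_vulnerability; infer_instance

def pvWitness_min_total_vulnerability : Int × Int × List Int := (3, 2, [4, 1, 3])

def Spec_min_total_vulnerability (N : Int) (K : Int) (arr : List Int) (out : Int) : Prop := out = min_total_vulnerability_alt N K arr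
instance (N : Int) (K : Int) (arr : List Int) (out : Int) : Decidable (Spec_min_total_vulnerability N K arr out) := by unfold Spec_min_total_vulnerability; infer_instance

-- ===== CLAIM (what is proved, stated in full; the proofs are below) =====
def Claim_equal_min_total_vulnerability : Prop := ∀ (N : Int) (K : Int) (arr : List Int), Dom_min_total_vulnerability N K arr → Pre_min_total_vulnerability N K arr → Spec_min_total_vulnerability N K arr (min_total_vulnerability N K arr)

-- ===== LEMMAS AND PROOFS =====

lemma pyMinO_right_comm (b a1 a2 : Option Int) :
    pyMinO (pyMinO b a1) a2 = pyMinO (pyMinO b a2) a1 := by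
  cases b <;> cases a1 <;> cases a2 <;> simp [pyMinO] <;> omega

-- wmax arr u t = max(0, max of arr[u..t-1])
def wmax (arr : List Int) (u t : Nat) : Int :=
  if u < t then max (arr.getD u 0) (wmax arr (u+1) t) else 0
termination_by t - u
decreasing_by omega

lemma wmax_stop (arr : List Int) (u t : Nat) (h : ¬ u < t) : wmax arr u t = 0 := by
  rw [wmax]; simp [h]

lemma wmax_cons (arr : List Int) (u t : Nat) (h : u < t) :
    wmax arr u t = max (arr.getD u 0) (wmax arr (u+1) t) := by
  conv_lhs => rw [wmax]
  simp [h]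

lemma wmax_snoc (arr : List Int) (u t : Nat) (h : u ≤ t) :
    wmax arr u (t+1) = max (wmax arr u t) (arr.getD t 0) := by
  rcases Nat.lt_or_ge u t with hlt | hge
  · rw [wmax_cons arr u (t+1) (by omega), wmax_cons arr u t hlt,
      wmax_snoc arr (u+1) t (by omega)]
    rw [max_assoc]
  · have hut : u = t := by omega
    subst hut
    rw [wmax_cons arr u (u+1) (by omega), wmax_stop arr (u+1) (u+1) (by omega),
      wmax_stop arr u u (by omega)]
    rw [max_comm]
termination_by t - u

lemma wmax_nonneg (arr : List Int) (u t : Nat) : 0 ≤ wmax arr u t := by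
  rw [wmax]
  split
  · exact le_trans (wmax_nonneg arr (u+1) t) (le_max_right _ _)
  · exact le_refl 0
termination_by t - u
decreasing_by omega

lemma wmax_step_left (arr : List Int) (u t : Nat) : wmax arr (u+1) t ≤ wmax arr u t := by
  rcases Nat.lt_or_ge u t with h | h
  · rw [wmax_cons arr u t h]; exact le_max_right _ _
  · rw [wmax_stop arr (u+1) t (by omega), wmax_stop arr u t (by omega)]

lemma wmax_mono_left (arr : List Int) (u u' t : Nat) (h : u ≤ u') :
    wmax arr u' t ≤ wmax arr u t := by
  induction u' with
  | zero => have : u = 0 := by omega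
            simp [this]
  | succ v ih =>
      rcases Nat.lt_or_ge u (v+1) with hlt | hge
      · exact le_trans (wmax_step_left arr v t) (ih (by omega))
      · have : u = v+1 := by omega
        simp [this]

-- the reference DP table: dspec arr K t = the common value of dp[t]
def pullVal (arr : List Int) (prev : List (Option Int)) (t : Nat) : Nat → Option Int
  | 0 => none
  | j+1 => pyMinO (pullVal arr prev t j)
      (addO (prev.getD (t-(j+1)) none) (wmax arr (t-(j+1)) t))

def dlist (arr : List Int) (K : Int) : Nat → List (Option Int)
  | 0 => [some 0]
  | t+1 => dlist arr K t ++ [pullVal arr (dlist arr K t) (t+1) (min K ((t : Int)+1)).toNat]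

def dspec (arr : List Int) (K : Int) (t : Nat) : Option Int := (dlist arr K t).getD t none

lemma dlist_length (arr : List Int) (K : Int) (n : Nat) : (dlist arr K n).length = n + 1 := by
  induction n with
  | zero => rfl
  | succ n ih => simp [dlist, ih]

lemma dlist_getD (arr : List Int) (K : Int) (n t : Nat) (h : t ≤ n) :
    (dlist arr K n).getD t none = dspec arr K t := by
  induction n with
  | zero => have : t = 0 := by omega
            subst this; rfl
  | succ n ih =>
      rcases Nat.lt_or_ge t (n+1) with hlt | hge
      · rw [dlist, List.getD_eq_getElem?_getD,
          List.getElem?_append_left (by rw [dlist_length]; omega),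
          ← List.getD_eq_getElem?_getD, ih (by omega)]
      · have : t = n + 1 := by omega
        subst this; rfl

lemma dspec_zero (arr : List Int) (K : Int) : dspec arr K 0 = some 0 := rfl

lemma dspec_succ (arr : List Int) (K : Int) (t : Nat) :
    dspec arr K (t+1) = pullVal arr (dlist arr K t) (t+1) (min K ((t : Int)+1)).toNat := by
  unfold dspec
  rw [dlist, List.getD_eq_getElem?_getD,
    List.getElem?_append_right (by rw [dlist_length]),
    dlist_length]
  simp

-- ===== A (pull) side =====
lemma aInner_pull (arr : List Int) (dp prev : List (Option Int)) (i : Nat)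
    (hpc : ∀ u, u < i → dp.getD u none = prev.getD u none) :
    ∀ rem j, 1 ≤ j → j - 1 + rem ≤ i →
      aInner arr dp i rem j (wmax arr (i-(j-1)) i) (pullVal arr prev i (j-1))
        = pullVal arr prev i (j-1+rem) := by
  intro rem
  induction rem with
  | zero => intro j hj hle; rfl
  | succ rem ih =>
      intro j hj hle
      have hji : j ≤ i := by omega
      have hlt : i - j < i := by omega
      have hmv : max (wmax arr (i-(j-1)) i) (arr.getD (i-j) 0) = wmax arr (i-j) i := by
        rw [wmax_cons arr (i-j) i hlt]
        have h1 : i - j + 1 = i - (j-1) := by omega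
        rw [h1, max_comm]
      have hacc : pyMinO (pullVal arr prev i (j-1))
          (addO (dp.getD (i-j) none) (wmax arr (i-j) i)) = pullVal arr prev i j := by
        have hj' : j = (j-1) + 1 := by omega
        conv_rhs => rw [hj']
        rw [pullVal]
        have h2 : i - (j-1+1) = i - j := by omega
        rw [h2, hpc _ hlt]
      simp only [aInner]
      rw [hmv, hacc]
      have := ih (j+1) (by omega) (by omega)
      simp only [Nat.add_sub_cancel] at this
      rw [this]
      congr 1
      omega

lemma aInner_eq_pullVal (arr : List Int) (dp prev : List (Option Int)) (i : Nat)
    (hpc : ∀ u, u < i → dp.getD u none = prev.getD u none)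
    (b : Nat) (hb : b ≤ i) :
    aInner arr dp i b 1 0 none = pullVal arr prev i b := by
  have h := aInner_pull arr dp prev i hpc b 1 (by omega) (by omega)
  simpa [wmax_stop arr i i (by omega), pullVal] using h

lemma aOuter_inv (arr : List Int) (K : Int) (n : Nat) :
    ∀ rem i dp, 1 ≤ i → i + rem = n + 1 → dp.length = n + 1 →
      (∀ u, u < i → dp.getD u none = dspec arr K u) →
      (∀ u, i ≤ u → dp.getD u none = none) →
      ∀ t, t ≤ n → (aOuter arr K rem i dp).getD t none = dspec arr K t := by
  intro rem
  induction rem with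
  | zero =>
      intro i dp hi hsum hlen hlow hhigh t ht
      simpa [aOuter] using hlow t (by omega)
  | succ rem ih =>
      intro i dp hi hsum hlen hlow hhigh t ht
      have hin : i ≤ n := by omega
      have hb : (min K (i:Int)).toNat ≤ i := by omega
      have hpc : ∀ u, u < i → dp.getD u none = (dlist arr K (i-1)).getD u none := by
        intro u hu
        rw [hlow u hu, dlist_getD arr K (i-1) u (by omega)]
      have hacc : dp.getD i none = none := hhigh i (le_refl i)
      have hv : aInner arr dp i (min K (i:Int)).toNat 1 0 (dp.getD i none) = dspec arr K i := by
        rw [hacc, aInner_eq_pullVal arr dp (dlist arr K (i-1)) i hpc _ hb]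
        have hi1 : i - 1 + 1 = i := by omega
        have hc : ((i-1 : Nat):Int) + 1 = (i:Int) := by omega
        have hd := dspec_succ arr K (i-1)
        rw [hi1, hc] at hd
        exact hd.symm
      simp only [aOuter]
      rw [hv]
      refine ih (i+1) (dp.set i (dspec arr K i)) (by omega) (by omega) (by simpa using hlen)
        ?_ ?_ t ht
      · intro u hu
        rcases Nat.lt_or_ge u i with hui | hui
        · rw [List.getD_eq_getElem?_getD, List.getElem?_set_ne (by omega),
            ← List.getD_eq_getElem?_getD, hlow u hui]
        · have : u = i := by omega
          subst this
          rw [List.getD_eq_getElem?_getD, List.getElem?_set_self (by omega)]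
          rfl
      · intro u hu
        rw [List.getD_eq_getElem?_getD, List.getElem?_set_ne (by omega),
          ← List.getD_eq_getElem?_getD, hhigh u (by omega)]

lemma a_result (N K : Int) (arr : List Int) :
    min_total_vulnerability N K arr = (dspec arr K N.toNat).getD 0 := by
  show ((aOuter arr K N.toNat 1
      ((List.replicate (N.toNat+1) (none : Option Int)).set 0 (some 0))).getD N.toNat none).getD 0
    = (dspec arr K N.toNat).getD 0
  have hlow : ∀ u, u < 1 →
      ((List.replicate (N.toNat+1) (none : Option Int)).set 0 (some 0)).getD u none
        = dspec arr K u := by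
    intro u hu
    have : u = 0 := by omega
    subst this
    rw [List.getD_eq_getElem?_getD, List.getElem?_set_self (by simp)]
    rfl
  have hhigh : ∀ u, 1 ≤ u →
      ((List.replicate (N.toNat+1) (none : Option Int)).set 0 (some 0)).getD u none = none := by
    intro u hu
    rw [List.getD_eq_getElem?_getD, List.getElem?_set_ne (by omega), List.getElem?_replicate]
    split <;> rfl
  rw [aOuter_inv arr K N.toNat N.toNat 1 _ (le_refl 1) (by omega) (by simp) hlow hhigh
    N.toNat (le_refl _)]

-- ===== pushP: dspec as a min over all valid starts (used by both sides) =====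
def condU (K : Int) (t u : Nat) : Bool := decide (u < t) && decide ((t:Int) ≤ (u:Int) + K)

def pushP (arr : List Int) (K : Int) (s t : Nat) : Option Int :=
  if t = 0 then some 0 else
  ((List.range s).filter (condU K t)).foldl
    (fun acc u => pyMinO acc (addO (dspec arr K u) (wmax arr u t))) none

lemma foldl_congr_mem' {A B : Type} (l : List A) (f g : B → A → B)
    (h : ∀ b a, a ∈ l → f b a = g b a) : ∀ init, l.foldl f init = l.foldl g init := by
  induction l with
  | nil => intro init; rfl
  | cons x xs ih =>
      intro init
      simp only [List.foldl_cons]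
      rw [h init x (by simp)]
      exact ih (fun b a ha => h b a (by simp [ha])) _

lemma pullVal_eq_foldl (arr : List Int) (prev : List (Option Int)) (t : Nat) :
    ∀ b, pullVal arr prev t b =
      ((List.range b).map (fun j0 => t - (j0+1))).foldl
        (fun acc u => pyMinO acc (addO (prev.getD u none) (wmax arr u t))) none := by
  intro b
  induction b with
  | zero => rfl
  | succ b ih =>
      rw [pullVal, List.range_succ, List.map_append, List.foldl_append, ih]
      rfl

lemma pushP_eq_dspec (arr : List Int) (K : Int) (s t : Nat) (h : t ≤ s) :
    pushP arr K s t = dspec arr K t := by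
  rcases Nat.eq_zero_or_pos t with h0 | h0
  · subst h0
    simp [pushP, dspec_zero]
  · obtain ⟨t', rfl⟩ : ∃ t', t = t'+1 := ⟨t-1, by omega⟩
    rw [dspec_succ arr K t', pullVal_eq_foldl]
    set b := (min K ((t' : Int)+1)).toNat with hb
    have hbt : b ≤ t' + 1 := by omega
    rw [foldl_congr_mem' (List.map (fun j0 => t'+1 - (j0+1)) (List.range b))
      (fun acc u => pyMinO acc (addO ((dlist arr K t').getD u none) (wmax arr u (t'+1))))
      (fun acc u => pyMinO acc (addO (dspec arr K u) (wmax arr u (t'+1))))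
      (by
        intro acc u hu
        simp only [List.mem_map, List.mem_range] at hu
        obtain ⟨j0, hj, rfl⟩ := hu
        beta_reduce
        rw [dlist_getD arr K t' _ (by omega)]) none]
    unfold pushP
    rw [if_neg (by omega)]
    have hperm : ((List.range s).filter (condU K (t'+1))).Perm
        ((List.range b).map (fun j0 => t'+1 - (j0+1))) := by
      rw [List.perm_ext_iff_of_nodup (List.nodup_range.filter _)
        (List.Nodup.map_on (by
          intro x hx y hy hxy
          simp only [List.mem_range] at hx hy
          omega) List.nodup_range)]
      intro u
      simp only [List.mem_filter, List.mem_range, List.mem_map, condU,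
        Bool.and_eq_true, decide_eq_true_eq]
      constructor
      · rintro ⟨hus, hut, huK⟩
        exact ⟨t' - u, by omega, by omega⟩
      · rintro ⟨j0, hj, rfl⟩
        refine ⟨by omega, by omega, by omega⟩
    have hrc : RightCommutative
        (fun (acc : Option Int) (u : Nat) =>
          pyMinO acc (addO (dspec arr K u) (wmax arr u (t'+1)))) :=
      ⟨fun acc a1 a2 => pyMinO_right_comm acc _ _⟩
    exact @List.Perm.foldl_eq _ _ _ _ _ hrc hperm none

-- ===== B (monotonic stack) side =====

def gd (arr : List Int) (K : Int) (t : Nat) : Int := (dspec arr K t).getD 0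

def loN (K : Int) (i : Nat) : Nat := ((i : Int) - K).toNat

-- the inf-respecting order: none = +inf
def leO : Option Int → Option Int → Prop
  | _, none => True
  | none, some _ => False
  | some a, some b => a ≤ b

lemma leO_trans {a b c : Option Int} (h1 : leO a b) (h2 : leO b c) : leO a c := by
  cases a <;> cases b <;> cases c <;> simp_all [leO] <;> omega

lemma pyMinO_le_left (a b : Option Int) : leO (pyMinO a b) a := by
  cases a <;> cases b <;> simp [pyMinO, leO]

lemma pyMinO_le_right (a b : Option Int) : leO (pyMinO a b) b := by
  cases a <;> cases b <;> simp [pyMinO, leO]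

lemma pyMinO_absorb {a b : Option Int} (h : leO a b) : pyMinO a b = a := by
  cases a <;> cases b <;> simp_all [pyMinO, leO] <;> omega

lemma pyMinO_cases (a b : Option Int) : pyMinO a b = a ∨ pyMinO a b = b := by
  cases a with
  | none => right; rfl
  | some x =>
      cases b with
      | none => left; rfl
      | some y =>
          rcases le_total x y with h | h
          · left; simp [pyMinO, min_eq_left h]
          · right; simp [pyMinO, min_eq_right h]

lemma pyMinO_some_assoc (x : Option Int) (p q : Int) :
    pyMinO (pyMinO x (some p)) (some q) = pyMinO x (some (min p q)) := by
  cases x <;> simp [pyMinO, min_assoc]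

def foldMinO {A : Type} (f : A → Option Int) (L : List A) (init : Option Int) : Option Int :=
  L.foldl (fun acc u => pyMinO acc (f u)) init

lemma foldMinO_le_init {A : Type} (f : A → Option Int) :
    ∀ (L : List A) init, leO (foldMinO f L init) init := by
  intro L
  induction L with
  | nil => intro init; cases init <;> simp [foldMinO, leO]
  | cons x xs ih =>
      intro init
      exact leO_trans (ih (pyMinO init (f x))) (pyMinO_le_left _ _)

lemma foldMinO_le_elem {A : Type} (f : A → Option Int) :
    ∀ (L : List A) init u, u ∈ L → leO (foldMinO f L init) (f u) := by
  intro L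
  induction L with
  | nil => intro init u hu; cases hu
  | cons x xs ih =>
      intro init u hu
      rcases List.mem_cons.mp hu with rfl | hu
      · exact leO_trans (foldMinO_le_init f xs _) (pyMinO_le_right _ _)
      · exact ih _ u hu

lemma foldMinO_eq_init_or_elem {A : Type} (f : A → Option Int) :
    ∀ (L : List A) init, foldMinO f L init = init ∨ ∃ u ∈ L, foldMinO f L init = f u := by
  intro L
  induction L with
  | nil => intro init; left; rfl
  | cons x xs ih =>
      intro init
      have hstep : foldMinO f (x :: xs) init = foldMinO f xs (pyMinO init (f x)) := rfl
      rcases ih (pyMinO init (f x)) with h | ⟨u, hu, h⟩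
      · rcases pyMinO_cases init (f x) with h2 | h2
        · left; rw [hstep, h, h2]
        · right; exact ⟨x, by simp, by rw [hstep, h, h2]⟩
      · right; exact ⟨u, by simp [hu], by rw [hstep, h]⟩

lemma foldMinO_pull_init {A : Type} (f : A → Option Int) :
    ∀ (L : List A) init c, foldMinO f L (pyMinO init c) = pyMinO (foldMinO f L init) c := by
  intro L
  induction L with
  | nil => intro init c; rfl
  | cons x xs ih =>
      intro init c
      show foldMinO f xs (pyMinO (pyMinO init c) (f x)) = pyMinO (foldMinO f xs (pyMinO init (f x))) c
      rw [pyMinO_right_comm, ih]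

-- dspec t (t ≥ 1) as a fold over the valid starts
lemma dspec_eq_fold (arr : List Int) (K : Int) (t : Nat) (h : t ≠ 0) :
    dspec arr K t = foldMinO (fun u => addO (dspec arr K u) (wmax arr u t))
      ((List.range t).filter (condU K t)) none := by
  rw [← pushP_eq_dspec arr K t t le_rfl]
  unfold pushP foldMinO
  rw [if_neg h]

lemma filter_range_eq_range' (P : Nat → Bool) (lo : Nat) :
    ∀ (t : Nat), (∀ u, u < t → (P u = true ↔ lo ≤ u)) →
      (List.range t).filter P = List.range' lo (t - lo) := by
  intro t
  induction t with
  | zero => intro _; simp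
  | succ t ih =>
      intro h
      rw [List.range_succ, List.filter_append, ih (fun u hu => h u (by omega))]
      by_cases hlt : lo ≤ t
      · have hP : P t = true := (h t (by omega)).mpr hlt
        have h2 : t + 1 - lo = (t - lo) + 1 := by omega
        rw [h2]
        have h3 : List.range' lo (t - lo + 1) = List.range' lo (t - lo) ++ [lo + (t - lo)] := by
          have := List.range'_concat (s := lo) (n := t - lo) (step := 1)
          simpa using this
        rw [h3]
        have h4 : lo + (t - lo) = t := by omega
        simp [hP, h4]
      · have hP : ¬ (P t = true) := by rw [h t (by omega)]; omega
        have h2 : t + 1 - lo = 0 := by omega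
        have h3 : t - lo = 0 := by omega
        simp [hP, h2, h3]

lemma validList_eq (K : Int) (t : Nat) :
    (List.range t).filter (condU K t) = List.range' (loN K t) (t - loN K t) := by
  apply filter_range_eq_range'
  intro u hu
  simp only [condU, Bool.and_eq_true, decide_eq_true_eq, loN]
  omega

-- finiteness of dspec for K ≥ 1
lemma dspec_fin (arr : List Int) (K : Int) (hK : 1 ≤ K) :
    ∀ t, ∃ v, dspec arr K t = some v := by
  intro t
  induction t with
  | zero => exact ⟨0, rfl⟩
  | succ t ih =>
      obtain ⟨v, hv⟩ := ih
      have hmem : t ∈ (List.range (t+1)).filter (condU K (t+1)) := by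
        simp only [List.mem_filter, List.mem_range, condU, Bool.and_eq_true, decide_eq_true_eq]
        omega
      have hle := foldMinO_le_elem (fun u => addO (dspec arr K u) (wmax arr u (t+1)))
        ((List.range (t+1)).filter (condU K (t+1))) none t hmem
      rw [← dspec_eq_fold arr K (t+1) (by omega)] at hle
      simp only [hv, addO] at hle
      cases hd : dspec arr K (t+1) with
      | none => rw [hd] at hle; simp [leO] at hle
      | some w => exact ⟨w, rfl⟩

lemma gd_le_succ (arr : List Int) (K : Int) (hK : 1 ≤ K) (t : Nat) :
    gd arr K t ≤ gd arr K (t+1) := by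
  have hfold := dspec_eq_fold arr K (t+1) (by omega)
  rcases foldMinO_eq_init_or_elem (fun u => addO (dspec arr K u) (wmax arr u (t+1)))
      ((List.range (t+1)).filter (condU K (t+1))) none with h | ⟨u0, hu0, h⟩
  · exfalso
    obtain ⟨v, hv⟩ := dspec_fin arr K hK (t+1)
    rw [← hfold] at h
    rw [hv] at h
    exact absurd h (by simp)
  · rw [← hfold] at h
    simp only [List.mem_filter, List.mem_range, condU, Bool.and_eq_true,
      decide_eq_true_eq] at hu0
    obtain ⟨v0, hv0⟩ := dspec_fin arr K hK u0
    rcases Nat.lt_or_ge u0 t with hu0t | hu0t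
    · -- u0 < t : dspec t ≤ dspec u0 + wmax u0 t ≤ dspec u0 + wmax u0 (t+1) = dspec (t+1)
      have hmem : u0 ∈ (List.range t).filter (condU K t) := by
        simp only [List.mem_filter, List.mem_range, condU, Bool.and_eq_true, decide_eq_true_eq]
        omega
      have hle := foldMinO_le_elem (fun u => addO (dspec arr K u) (wmax arr u t))
        ((List.range t).filter (condU K t)) none u0 hmem
      rw [← dspec_eq_fold arr K t (by omega)] at hle
      obtain ⟨vt, hvt⟩ := dspec_fin arr K hK t
      simp only [hvt, hv0, addO, leO] at hle
      have hww : wmax arr u0 t ≤ wmax arr u0 (t+1) := by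
        rw [wmax_snoc arr u0 t (by omega)]
        exact le_max_left _ _
      simp only [gd, h, hv0, hvt, addO, Option.getD_some]
      omega
    · -- u0 = t
      have heq : u0 = t := by omega
      rw [heq] at h hv0
      simp only [gd, h, hv0, addO, Option.getD_some]
      have := wmax_nonneg arr t (t+1)
      omega

lemma gd_mono (arr : List Int) (K : Int) (hK : 1 ≤ K) (a b : Nat) (h : a ≤ b) :
    gd arr K a ≤ gd arr K b := by
  induction b with
  | zero => have : a = 0 := by omega
            simp [this]
  | succ b ih =>
      rcases Nat.lt_or_ge a (b+1) with hlt | hge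
      · exact le_trans (ih (by omega)) (gd_le_succ arr K hK b)
      · have : a = b+1 := by omega
        simp [this]

-- the candidate function, already in finite form
def FC (arr : List Int) (K : Int) (i u : Nat) : Option Int := some (gd arr K u + wmax arr u i)

-- collapse a fold over a block of starts with constant window maximum
lemma foldMinO_range'_block (arr : List Int) (K : Int) (hK : 1 ≤ K) (i a : Nat) (m : Int) :
    ∀ (c : Nat), 1 ≤ c → (∀ u, a ≤ u → u < a + c → wmax arr u i = m) →
      ∀ init, foldMinO (FC arr K i) (List.range' a c) init = pyMinO init (some (gd arr K a + m)) := by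
  intro c
  induction c with
  | zero => intro h; omega
  | succ c ih =>
      intro _ hm init
      rcases Nat.eq_zero_or_pos c with hc0 | hc0
      · subst hc0
        show pyMinO init (FC arr K i a) = _
        rw [FC, hm a (le_refl a) (by omega)]
      · have h3 : List.range' a (c + 1) = List.range' a c ++ [a + c] := by
          have := List.range'_concat (s := a) (n := c) (step := 1)
          simpa using this
        unfold foldMinO
        rw [h3, List.foldl_append]
        have hIH := ih hc0 (fun u h1 h2 => hm u h1 (by omega)) init
        unfold foldMinO at hIH
        rw [hIH]
        show pyMinO (pyMinO init (some (gd arr K a + m))) (FC arr K i (a+c)) = _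
        rw [FC, hm (a+c) (by omega) (by omega), pyMinO_some_assoc]
        have : min (gd arr K a + m) (gd arr K (a+c) + m) = gd arr K a + m := by
          have := gd_mono arr K hK a (a+c) (by omega)
          omega
        rw [this]

-- the stack invariant: S is stored top→bottom; entry (l, m) covers starts
-- [l, hi) where hi is the l of the entry above (i for the top entry);
-- every start j in the block has wmax arr j i = m; maxima strictly increase
-- downwards; the bottom entry starts at or below lo.
def SInv (arr : List Int) (i lo : Nat) : List (Nat × Int) → Nat → Prop
  | [], _ => False
  | (l, m) :: rest, hi =>
      l < hi ∧ (∀ j, l ≤ j → j < hi → wmax arr j i = m) ∧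
      (match rest with
       | [] => l ≤ lo
       | (l', m') :: _ => m < m' ∧ SInv arr i lo rest l)

-- the option-level scan
def scanO (arr : List Int) (K : Int) (lo : Nat) (S : List (Nat × Int)) (init : Option Int) :
    Option Int :=
  foldMinO (fun e => some (gd arr K (max e.1 lo) + e.2)) S init

lemma scanO_absorb (arr : List Int) (K : Int) (i lo : Nat) (hloi : lo ≤ i) :
    ∀ (S : List (Nat × Int)) hi, SInv arr i lo S hi → hi ≤ lo →
      ∀ X, leO X (some (gd arr K lo + wmax arr lo i)) → scanO arr K lo S X = X := by
  intro S
  induction S with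
  | nil => intro hi _ _ X _; rfl
  | cons e rest ih =>
      intro hi hinv hhi X hX
      obtain ⟨l, m⟩ := e
      obtain ⟨hl, hblock, htail⟩ := hinv
      have hm : m = wmax arr l i := (hblock l (le_refl l) hl).symm
      have hmge : wmax arr lo i ≤ m := by
        rw [hm]
        exact wmax_mono_left arr l lo i (by omega)
      have habs : pyMinO X (some (gd arr K (max l lo) + m)) = X := by
        apply pyMinO_absorb
        have hmax : max l lo = lo := by omega
        rw [hmax]
        refine leO_trans hX ?_
        simp only [leO]
        omega
      show scanO arr K lo rest (pyMinO X (some (gd arr K (max l lo) + m))) = X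
      rw [habs]
      cases rest with
      | nil => rfl
      | cons e2 rest2 =>
          obtain ⟨hmm, hrest⟩ := htail
          exact ih l hrest (by omega) X hX

lemma scanO_eq_fold (arr : List Int) (K : Int) (hK : 1 ≤ K) (i lo : Nat) (hloi : lo < i) :
    ∀ (S : List (Nat × Int)) hi, SInv arr i lo S hi → hi ≤ i → lo < hi →
      ∀ init, scanO arr K lo S init = foldMinO (FC arr K i) (List.range' lo (hi - lo)) init := by
  intro S
  induction S with
  | nil => intro hi hinv; cases hinv
  | cons e rest ih =>
      intro hi hinv hhi hlohi init
      obtain ⟨l, m⟩ := e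
      obtain ⟨hl, hblock, htail⟩ := hinv
      rcases Nat.lt_or_ge lo l with h1 | h2
      · -- head block lies strictly above lo; rest is nonempty
        cases rest with
        | nil => omega
        | cons e2 rest2 =>
            obtain ⟨hmm, hrest⟩ := htail
            have hmax : max l lo = l := by omega
            have hsplit : List.range' lo (hi - lo)
                = List.range' lo (l - lo) ++ List.range' l (hi - l) := by
              have := List.range'_append (s := lo) (m := l - lo) (n := hi - l) (step := 1)
              simp only [one_mul] at this
              rw [show lo + (l - lo) = l by omega] at this
              rw [show (l - lo) + (hi - l) = hi - lo by omega] at this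
              exact this.symm
            show scanO arr K lo (e2 :: rest2) (pyMinO init (some (gd arr K (max l lo) + m))) = _
            rw [hmax]
            have hpull : scanO arr K lo (e2 :: rest2) (pyMinO init (some (gd arr K l + m)))
                = pyMinO (scanO arr K lo (e2 :: rest2) init) (some (gd arr K l + m)) :=
              foldMinO_pull_init _ (e2 :: rest2) init _
            rw [hpull, ih l hrest (by omega) h1 init, hsplit]
            unfold foldMinO
            rw [List.foldl_append]
            have hcol := foldMinO_range'_block arr K hK i l m (hi - l) (by omega)
              (fun u hu1 hu2 => hblock u hu1 (by omega))
              (foldMinO (FC arr K i) (List.range' lo (l - lo)) init)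
            unfold foldMinO at hcol
            rw [hcol]
      · -- head block contains lo; everything below is expired
        have hmax : max l lo = lo := by omega
        have hm : m = wmax arr lo i := (hblock lo h2 hlohi).symm
        have hRHS : foldMinO (FC arr K i) (List.range' lo (hi - lo)) init
            = pyMinO init (some (gd arr K lo + m)) :=
          foldMinO_range'_block arr K hK i lo m (hi - lo) (by omega)
            (fun u hu1 hu2 => hblock u (by omega) (by omega)) init
        show scanO arr K lo rest (pyMinO init (some (gd arr K (max l lo) + m))) = _
        rw [hmax, hRHS]
        cases rest with
        | nil => rfl
        | cons e2 rest2 =>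
            obtain ⟨hmm, hrest⟩ := htail
            exact scanO_absorb arr K i lo (by omega) (e2 :: rest2) l hrest (by omega) _
              (by rw [← hm]; exact pyMinO_le_right _ _)

-- dspec i as the collapsed fold (i ≥ 1)
lemma dspec_eq_FC_fold (arr : List Int) (K : Int) (hK : 1 ≤ K) (i : Nat) (h1 : 1 ≤ i) :
    dspec arr K i = foldMinO (FC arr K i) (List.range' (loN K i) (i - loN K i)) none := by
  rw [dspec_eq_fold arr K i (by omega), validList_eq]
  unfold foldMinO
  apply foldl_congr_mem'
  intro b u hu
  obtain ⟨v, hv⟩ := dspec_fin arr K hK u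
  simp only [FC, hv, addO, gd, Option.getD_some]

-- loN is monotone
lemma loN_mono (K : Int) (i j : Nat) (h : i ≤ j) : loN K i ≤ loN K j := by
  unfold loN; omega

-- re-index a stack whose maxima all exceed the appended element
lemma SInv_reindex (arr : List Int) (K : Int) (i : Nat) (hi1 : 1 ≤ i) (x : Int)
    (hx : x = if arr.getD (i-1) 0 < 0 then 0 else arr.getD (i-1) 0) :
    ∀ (S : List (Nat × Int)) hi, SInv arr (i-1) (loN K (i-1)) S hi → hi ≤ i - 1 →
      (match S with | [] => True | (l, m) :: _ => x < m) →
      SInv arr i (loN K i) S hi := by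
  intro S
  induction S with
  | nil => intro hi hinv; cases hinv
  | cons e rest ih =>
      intro hi hinv hhi hhead
      obtain ⟨l, m⟩ := e
      obtain ⟨hl, hblock, htail⟩ := hinv
      have hxm : x < m := hhead
      have hblock' : ∀ j, l ≤ j → j < hi → wmax arr j i = m := by
        intro j hj1 hj2
        have h1 : wmax arr j ((i-1)+1) = max (wmax arr j (i-1)) (arr.getD (i-1) 0) := by
          exact wmax_snoc arr j (i-1) (by omega)
        rw [show (i-1)+1 = i by omega] at h1
        rw [h1, hblock j hj1 hj2]
        have hax : arr.getD (i-1) 0 ≤ x := by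
          rw [hx]
          by_cases hc : arr.getD (i-1) 0 < 0
          · rw [if_pos hc]; omega
          · rw [if_neg hc]
        exact max_eq_left (by omega)
      refine ⟨hl, hblock', ?_⟩
      cases rest with
      | nil =>
          exact le_trans htail (loN_mono K (i-1) i (by omega))
      | cons e2 rest2 =>
          obtain ⟨hmm, hrest⟩ := htail
          exact ⟨hmm, ih l hrest (by omega) (by obtain ⟨l2, m2⟩ := e2; exact lt_trans hxm hmm)⟩

-- popMerge builds a valid stack for index i
lemma popMerge_spec (arr : List Int) (K : Int) (i : Nat) (hi1 : 1 ≤ i) (x : Int)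
    (hx : x = if arr.getD (i-1) 0 < 0 then 0 else arr.getD (i-1) 0) :
    ∀ (S : List (Nat × Int)) (l0 : Nat),
      (SInv arr (i-1) (loN K (i-1)) S l0 ∨ (S = [] ∧ (l0 = 0 ∨ l0 ≤ loN K (i-1)))) →
      l0 ≤ i - 1 →
      (∀ j, l0 ≤ j → j < i - 1 → wmax arr j (i-1) ≤ x) →
      SInv arr i (loN K i) (((popMerge x S l0).2, x) :: (popMerge x S l0).1) i := by
  have hx0 : 0 ≤ x := by rw [hx]; split <;> omega
  have hax : arr.getD (i-1) 0 ≤ x := by rw [hx]; split <;> omega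
  have hwlast : wmax arr (i-1) i = x := by
    rw [wmax_cons arr (i-1) i (by omega), show (i-1)+1 = i by omega,
      wmax_stop arr i i (by omega)]
    rw [hx]
    by_cases hc : arr.getD (i-1) 0 < 0
    · rw [if_pos hc]; exact max_eq_right (by omega)
    · rw [if_neg hc]; exact max_eq_left (by omega)
  have hblockx : ∀ (l0 : Nat), l0 ≤ i - 1 →
      (∀ j, l0 ≤ j → j < i - 1 → wmax arr j (i-1) ≤ x) →
      (∀ j, l0 ≤ j → j < i → wmax arr j i = x) := by
    intro l0 hl0 H j hj1 hj2
    rcases Nat.lt_or_ge j (i-1) with hj3 | hj3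
    · have h1 : wmax arr j ((i-1)+1) = max (wmax arr j (i-1)) (arr.getD (i-1) 0) :=
        wmax_snoc arr j (i-1) (by omega)
      rw [show (i-1)+1 = i by omega] at h1
      rw [h1]
      have h2 := H j hj1 hj3
      have h3 := wmax_nonneg arr j (i-1)
      apply le_antisymm
      · exact max_le h2 hax
      · rw [hx]
        by_cases hc : arr.getD (i-1) 0 < 0
        · rw [if_pos hc]; exact le_trans h3 (le_max_left _ _)
        · rw [if_neg hc]; exact le_max_right _ _
    · rw [show j = i - 1 by omega, hwlast]
  intro S
  induction S with
  | nil =>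
      intro l0 hdisj hl0 H
      show SInv arr i (loN K i) [(l0, x)] i
      refine ⟨by omega, hblockx l0 hl0 H, ?_⟩
      rcases hdisj with h | ⟨_, h0 | hle⟩
      · cases h
      · simp [h0]
      · exact le_trans hle (loN_mono K (i-1) i (by omega))
  | cons e rest ih =>
      intro l0 hdisj hl0 H
      obtain ⟨l', m'⟩ := e
      rcases hdisj with hinv | ⟨habs, _⟩
      · obtain ⟨hl', hblock, htail⟩ := hinv
        show SInv arr i (loN K i) (((popMerge x ((l', m') :: rest) l0).2, x)
          :: (popMerge x ((l', m') :: rest) l0).1) i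
        rw [popMerge]
        by_cases hcmp : m' ≤ x
        · rw [if_pos hcmp]
          apply ih l'
          · cases rest with
            | nil => right; exact ⟨rfl, Or.inr htail⟩
            | cons e2 rest2 => left; exact htail.2
          · omega
          · intro j hj1 hj2
            rcases Nat.lt_or_ge j l0 with hj3 | hj3
            · rw [hblock j hj1 (by omega)]; exact hcmp
            · exact H j hj3 hj2
        · rw [if_neg hcmp]
          refine ⟨by omega, hblockx l0 hl0 H, ?_⟩
          refine ⟨by omega, ?_⟩
          exact SInv_reindex arr K i hi1 x hx ((l', m') :: rest) l0
            ⟨hl', hblock, htail⟩ hl0 (by omega)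
      · exact absurd habs (by simp)

-- trimRec facts
lemma trimRec_suffix (lo : Nat) : ∀ (R : List (Nat × Int)), trimRec lo R <:+ R := by
  intro R
  match R with
  | [] => exact List.suffix_refl _
  | [e] => exact List.suffix_refl _
  | e1 :: e2 :: rest =>
      rw [trimRec]
      split
      · exact (trimRec_suffix lo (e2 :: rest)).trans (List.suffix_cons e1 _)
      · exact List.suffix_refl _

lemma trimRec_ne_nil (lo : Nat) : ∀ (R : List (Nat × Int)), R ≠ [] → trimRec lo R ≠ [] := by
  intro R
  match R with
  | [] => intro h; exact absurd rfl h
  | [e] => intro _; simp [trimRec]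
  | e1 :: e2 :: rest =>
      intro _
      rw [trimRec]
      split
      · exact trimRec_ne_nil lo (e2 :: rest) (by simp)
      · simp

lemma trimRec_head_le (lo : Nat) :
    ∀ (R : List (Nat × Int)) (d : Nat × Int), (R.headD d).1 ≤ lo →
      ((trimRec lo R).headD d).1 ≤ lo := by
  intro R
  match R with
  | [] => intro d h; exact h
  | [e] => intro d h; simpa [trimRec] using h
  | e1 :: e2 :: rest =>
      intro d h
      rw [trimRec]
      split
      · exact trimRec_head_le lo (e2 :: rest) d (by simpa using ‹e2.1 ≤ lo›)
      · simpa using h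

-- SInv is closed under taking a prefix whose last entry still starts at or below lo
lemma SInv_prefix (arr : List Int) (i lo : Nat) :
    ∀ (S' S : List (Nat × Int)) hi, SInv arr i lo S hi → S' <+: S → S' ≠ [] →
      (∀ p, S'.getLast? = some p → p.1 ≤ lo) → SInv arr i lo S' hi := by
  intro S'
  induction S' with
  | nil => intro S hi _ _ h; exact absurd rfl h
  | cons e rest' ih =>
      intro S hi hinv hpre _ hlast
      obtain ⟨l, m⟩ := e
      cases S with
      | nil => exact absurd (List.prefix_nil.mp hpre) (by simp)
      | cons e2 rest =>
          obtain ⟨heq, hpre'⟩ := List.cons_prefix_cons.mp hpre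
          subst heq
          obtain ⟨hl, hblock, htail⟩ := hinv
          refine ⟨hl, hblock, ?_⟩
          cases rest' with
          | nil =>
              exact hlast (l, m) (by simp)
          | cons e3 rest3 =>
              cases rest with
              | nil => exact absurd (List.prefix_nil.mp hpre') (by simp)
              | cons e4 rest4 =>
                  obtain ⟨heq2, _⟩ := List.cons_prefix_cons.mp hpre'
                  obtain ⟨hmm, hrest⟩ := htail
                  subst heq2
                  refine ⟨hmm, ih (e3 :: rest4) l hrest hpre' (by simp) ?_⟩
                  intro p hp
                  apply hlast p
                  rwa [List.getLast?_cons_cons]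

-- the bottom of a top→bottom stack is the head of its reversal
lemma SInv_getLast_le (arr : List Int) (i lo : Nat) :
    ∀ (S : List (Nat × Int)) hi, SInv arr i lo S hi →
      ∀ p, S.getLast? = some p → p.1 ≤ lo := by
  intro S
  induction S with
  | nil => intro hi hinv; cases hinv
  | cons e rest ih =>
      intro hi hinv p hp
      obtain ⟨l, m⟩ := e
      obtain ⟨_, _, htail⟩ := hinv
      cases rest with
      | nil =>
          simp only [List.getLast?_singleton, Option.some.injEq] at hp
          rw [← hp]
          exact htail
      | cons e2 rest2 =>
          obtain ⟨_, hrest⟩ := htail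
          apply ih l hrest p
          rwa [List.getLast?_cons_cons] at hp

lemma trim_SInv (arr : List Int) (i lo : Nat) (S : List (Nat × Int)) (hi : Nat)
    (hinv : SInv arr i lo S hi) :
    SInv arr i lo ((trimRec lo S.reverse).reverse) hi ∧ (trimRec lo S.reverse).reverse ≠ [] := by
  have hSne : S ≠ [] := by
    intro hnil
    subst hnil
    simp [SInv] at hinv
  have hRne : S.reverse ≠ [] := by simpa using hSne
  have hTne := trimRec_ne_nil lo S.reverse hRne
  have hsuf : trimRec lo S.reverse <:+ S.reverse := trimRec_suffix lo S.reverse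
  have hpre : (trimRec lo S.reverse).reverse <+: S := by
    have := List.reverse_suffix (l₁ := (trimRec lo S.reverse).reverse) (l₂ := S)
    rw [List.reverse_reverse] at this
    exact this.mp hsuf
  have hbot : ∀ p, S.getLast? = some p → p.1 ≤ lo := SInv_getLast_le arr i lo S hi hinv
  -- the head of S.reverse is the last of S
  obtain ⟨q, hq⟩ := List.getLast?_isSome.mpr hSne |> Option.isSome_iff_exists.mp
  have hheadRev : S.reverse.headD (0, 0) = q := by
    rw [List.headD_eq_head?_getD, List.head?_reverse, hq]; rfl
  have hqle : q.1 ≤ lo := hbot q hq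
  have hhead2 : ((trimRec lo S.reverse).headD (0, 0)).1 ≤ lo :=
    trimRec_head_le lo S.reverse (0, 0) (by rw [hheadRev]; exact hqle)
  have hlast2 : ∀ p, ((trimRec lo S.reverse).reverse).getLast? = some p → p.1 ≤ lo := by
    intro p hp
    rw [List.getLast?_reverse] at hp
    have : (trimRec lo S.reverse).headD (0,0) = p := by
      rw [List.headD_eq_head?_getD, hp]; rfl
    rw [← this]
    exact hhead2
  refine ⟨SInv_prefix arr i lo _ S hi hinv hpre (by simpa using hTne) hlast2, by simpa using hTne⟩

-- the Int-level scan agrees with the option-level scan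
lemma scanMin_eq_scanO (arr : List Int) (K : Int) (i lo : Nat) (dp : List Int)
    (hdp : ∀ t, t < i → dp.getD t 0 = gd arr K t) (hloi : lo < i) :
    ∀ (S : List (Nat × Int)) hi, (S = [] ∨ SInv arr i lo S hi) → hi ≤ i →
      ∀ acc, some (scanMin dp lo S acc) = scanO arr K lo S (some acc) := by
  intro S
  induction S with
  | nil => intro hi _ _ acc; rfl
  | cons e rest ih =>
      intro hi hinv hhi acc
      obtain ⟨l, m⟩ := e
      rcases hinv with h | hinv
      · exact absurd h (by simp)
      obtain ⟨hl, hblock, htail⟩ := hinv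
      have hidx : max l lo < i := by omega
      have hcell : dp.getD (max l lo) 0 = gd arr K (max l lo) := hdp _ hidx
      show some (scanMin dp lo rest (min acc (dp.getD (max l lo) 0 + m)))
        = scanO arr K lo rest (pyMinO (some acc) (some (gd arr K (max l lo) + m)))
      rw [hcell]
      have hnext : (rest = [] ∨ SInv arr i lo rest l) := by
        cases rest with
        | nil => left; rfl
        | cons e2 rest2 => right; exact htail.2
      exact ih l hnext (by omega) _

-- one full iteration of bLoop computes gd i
lemma bLoop_inv (arr : List Int) (K : Int) (hK : 1 ≤ K) (n : Nat) :
    ∀ (rem i : Nat) (dp : List Int) (S : List (Nat × Int)),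
      1 ≤ i → i + rem = n + 1 → dp.length = n + 1 →
      (∀ t, t < i → dp.getD t 0 = gd arr K t) →
      ((S = [] ∧ i = 1) ∨ SInv arr (i-1) (loN K (i-1)) S (i-1)) →
      ∀ t, t ≤ n → (bLoop arr K n rem i dp S).getD t 0 = gd arr K t := by
  intro rem
  induction rem with
  | zero =>
      intro i dp S hi hsum hlen hdp hS t ht
      show dp.getD t 0 = gd arr K t
      exact hdp t (by omega)
  | succ rem ih =>
      intro i dp S hi hsum hlen hdp hS t ht
      have hin : i ≤ n := by omega
      -- the pushed stack
      set x0 := arr.getD (i-1) 0 with hx0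
      set x : Int := if x0 < 0 then 0 else x0 with hxdef
      set pm := popMerge x S (i-1) with hpm
      set lo := loN K i with hlo
      have hloi : lo < i := by unfold loN at hlo; omega
      have hS1 : SInv arr i lo ((pm.2, x) :: pm.1) i := by
        apply popMerge_spec arr K i (by omega) x (by rw [hxdef, hx0])
        · rcases hS with ⟨hSnil, hie⟩ | hinv
          · right; exact ⟨hSnil, Or.inl (by omega)⟩
          · left; exact hinv
        · omega
        · intro j hj1 hj2; omega
      set stack2 := (trimRec lo ((pm.2, x) :: pm.1).reverse).reverse with hst2
      obtain ⟨hS2, hS2ne⟩ := trim_SInv arr i lo ((pm.2, x) :: pm.1) i hS1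
      rw [← hst2] at hS2 hS2ne
      -- the computed value
      have hv : ∀ l0 m0 rest, stack2 = (l0, m0) :: rest →
          some (scanMin dp lo rest (dp.getD (max l0 lo) 0 + m0)) = dspec arr K i := by
        intro l0 m0 rest hs
        rw [hs] at hS2
        obtain ⟨hl0, hblock0, htail0⟩ := hS2
        have h1 : some (scanMin dp lo rest (dp.getD (max l0 lo) 0 + m0))
            = scanO arr K lo ((l0, m0) :: rest) none := by
          have hcell : dp.getD (max l0 lo) 0 = gd arr K (max l0 lo) := hdp _ (by omega)
          show _ = scanO arr K lo rest (pyMinO none (some (gd arr K (max l0 lo) + m0)))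
          rw [← hcell]
          have hnext : (rest = [] ∨ SInv arr i lo rest l0) := by
            cases rest with
            | nil => left; rfl
            | cons e2 rest2 => right; exact htail0.2
          exact scanMin_eq_scanO arr K i lo dp hdp hloi rest l0 hnext (by omega) _
        rw [h1]
        rw [scanO_eq_fold arr K hK i lo hloi ((l0, m0) :: rest) i
          ⟨hl0, hblock0, htail0⟩ le_rfl hloi none]
        exact (dspec_eq_FC_fold arr K hK i (by omega)).symm
      -- step
      show (bLoop arr K n (rem+1) i dp S).getD t 0 = gd arr K t
      rw [bLoop]
      simp only [← hx0, ← hxdef, ← hpm]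
      have hlo' : ((i : Int) - K).toNat = lo := by rw [hlo]; rfl
      rw [hlo', ← hst2]
      cases hs2 : stack2 with
      | nil => exact absurd hs2 hS2ne
      | cons e0 rest0 =>
          obtain ⟨l0, m0⟩ := e0
          have hvg : scanMin dp lo rest0 (dp.getD (max l0 lo) 0 + m0) = gd arr K i := by
            have h2 := hv l0 m0 rest0 hs2
            rw [gd, ← h2]
            rfl
          show (bLoop arr K n rem (i+1)
              (dp.set i (scanMin dp lo rest0 (dp.getD (max l0 lo) 0 + m0)))
              ((l0, m0) :: rest0)).getD t 0 = gd arr K t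
          apply ih (i+1) _ ((l0, m0) :: rest0) (by omega) (by omega) (by simpa using hlen)
          · intro u hu
            rcases Nat.lt_or_ge u i with hui | hui
            · rw [List.getD_eq_getElem?_getD, List.getElem?_set_ne (by omega),
                ← List.getD_eq_getElem?_getD]
              exact hdp u hui
            · have : u = i := by omega
              subst this
              rw [List.getD_eq_getElem?_getD, List.getElem?_set_self (by omega)]
              simpa using hvg
          · right
            show SInv arr ((i+1)-1) (loN K ((i+1)-1)) ((l0, m0) :: rest0) ((i+1)-1)
            rw [← hs2]
            rw [hlo] at hS2
            simpa using hS2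
          · exact ht

lemma b_result (N K : Int) (arr : List Int) (hK : 1 ≤ K) :
    min_total_vulnerability_alt N K arr = gd arr K N.toNat := by
  show (bLoop arr K N.toNat N.toNat 1 (List.replicate (N.toNat+1) (0:Int)) []).getD N.toNat 0
    = gd arr K N.toNat
  apply bLoop_inv arr K hK N.toNat N.toNat 1 _ [] (le_refl 1) (by omega) (by simp)
  · intro t ht
    have : t = 0 := by omega
    subst this
    rw [List.getD_eq_getElem?_getD, List.getElem?_replicate]
    simp [gd, dspec_zero]
  · left; exact ⟨rfl, rfl⟩
  · exact le_refl _

-- ===== VERDICT (by name: the statement is the Claim_ definition above) =====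
theorem min_total_vulnerability_spec : Claim_equal_min_total_vulnerability := by
  intro N K arr _ hpre
  obtain ⟨hN0, hNlen, hKor⟩ := hpre
  unfold Spec_min_total_vulnerability
  rcases hKor with hK | hN
  · rw [a_result, b_result N K arr hK]
    rfl
  · subst hN
    rw [a_result]
    rfl
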